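-- pv_equiv track=rewrite | github.com/asilism/PersonalAssistant | src/orchestration/placeholder_resolver.py | _transform_expression
-- ===== SOURCE A (Python) =====
-- def _transform_expression(expression: str) -> str:
--     """
--     Transform step_id.field syntax to step_id['field'] for dict access
--
--     Args:
--         expression: Original expression like "step_1.attendees + ['new@email.com']"
--
--     Returns:
--         Transformed expression like "step_1['attendees'] + ['new@email.com']"
--     """
--     # We need to be careful not to transform dots inside strings
--     # Strategy: Replace dots only outside of quoted strings
--
--     result = []
--     i = 0
--     in_string = False
--     string_char = None
--
--     while i < len(expression):
--         char = expression[i]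
--
--         # Track if we're inside a string
--         if char in ('"', "'"):
--             if not in_string:
--                 in_string = True
--                 string_char = char
--             elif char == string_char:
--                 in_string = False
--                 string_char = None
--             result.append(char)
--             i += 1
--         elif not in_string and (char.isalpha() or char.isdigit() or char == '_'):
--             # Start of an identifier
--             identifier_start = i
--             while i < len(expression) and (expression[i].isalnum() or expression[i] == '_'):
--                 i += 1
--
--             identifier = expression[identifier_start:i]
--
--             # Check for chained field access (e.g., step_1.event.attendees)
--             fields = [identifier]
--             while i < len(expression) and expression[i] == '.':
--                 # Look ahead to see if this is field access (word.word pattern)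
--                 j = i + 1
--                 if j < len(expression) and (expression[j].isalpha() or expression[j] == '_'):
--                     # This is field access
--                     field_start = j
--                     while j < len(expression) and (expression[j].isalnum() or expression[j] == '_'):
--                         j += 1
--                     field = expression[field_start:j]
--                     fields.append(field)
--                     i = j
--                 else:
--                     # Not field access, break the chain
--                     break
--
--             # Build the bracket notation
--             if len(fields) > 1:
--                 # Multiple fields, use bracket notation for all but the first
--                 result.append(fields[0])
--                 for field in fields[1:]:
--                     result.append(f"['{field}']")
--             else:
--                 # Single identifier, no transformation needed
--                 result.append(identifier)
--         else:
--             result.append(char)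
--             i += 1
--
--     return ''.join(result)
-- ===== SOURCE B (Python) =====
-- def _transform_code(seg: str) -> str:
--     # Rewrite every dot that sits between an identifier char and a field start
--     # as ['field']; purely local rule, no tokenization.
--     res = []
--     k = 0
--     n = len(seg)
--     while k < n:
--         c = seg[k]
--         if (c == '.' and k > 0 and (seg[k - 1].isalnum() or seg[k - 1] == '_')
--                 and k + 1 < n and (seg[k + 1].isalpha() or seg[k + 1] == '_')):
--             j = k + 1
--             while j < n and (seg[j].isalnum() or seg[j] == '_'):
--                 j += 1
--             res.append("['" + seg[k + 1:j] + "']")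
--             k = j
--         else:
--             res.append(c)
--             k += 1
--     return ''.join(res)
--
--
-- def _transform_expression(expression: str) -> str:
--     # Phase 1: split into string literals (copied verbatim) and code segments;
--     # Phase 2: transform each code segment independently.
--     out = []
--     i = 0
--     n = len(expression)
--     while i < n:
--         c = expression[i]
--         if c in ('"', "'"):
--             end = expression.find(c, i + 1)
--             if end == -1:
--                 out.append(expression[i:])
--                 i = n
--             else:
--                 out.append(expression[i:end + 1])
--                 i = end + 1
--         else:
--             j = i
--             while j < n and expression[j] not in ('"', "'"):
--                 j += 1
--             out.append(_transform_code(expression[i:j]))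
--             i = j
--     return ''.join(out)
-- ===== Notes on version B (the rewrite author's own statement) =====
-- stated objective: simpler
-- what changed: A's single state machine that tracks in-string state and tokenizes identifier/field chains with an inner lookahead loop is replaced by two phases: split the input at string literals (copied verbatim), then rewrite each code segment with a purely local rule that turns a dot between an identifier character and a field-start character into ['field'].
import Mathlib
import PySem

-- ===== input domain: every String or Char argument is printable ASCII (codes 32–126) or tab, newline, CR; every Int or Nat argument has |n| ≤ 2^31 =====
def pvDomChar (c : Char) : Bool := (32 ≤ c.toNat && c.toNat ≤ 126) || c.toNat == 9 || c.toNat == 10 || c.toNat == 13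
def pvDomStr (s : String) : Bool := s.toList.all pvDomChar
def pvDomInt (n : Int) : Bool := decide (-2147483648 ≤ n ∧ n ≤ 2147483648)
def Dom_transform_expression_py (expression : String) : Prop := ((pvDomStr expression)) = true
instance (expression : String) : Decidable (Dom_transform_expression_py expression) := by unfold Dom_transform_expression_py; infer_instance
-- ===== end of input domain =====

-- B replaces A's identifier/field-tokenizing state machine by two phases — split the
-- input at string literals, then rewrite each code segment by a local dot rule —
-- objective: simpler.

-- Shared character classes (Python isalnum/isalpha, exact on the ASCII domain)
def pvIdc (c : Char) : Bool := c.isAlphanum || c == '_'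
def pvFstart (c : Char) : Bool := c.isAlpha || c == '_'
def pvFstartHead (l : List Char) : Bool := match l with | d :: _ => pvFstart d | [] => false
def pvBracket (f : List Char) : List Char := '[' :: '\'' :: (f ++ ['\'', ']'])

theorem pvFstart_idc {c : Char} (h : pvFstart c = true) : pvIdc c = true := by
  simp [pvFstart, pvIdc, Char.isAlphanum] at *
  rcases h with h | h
  · exact Or.inl (Or.inl h)
  · exact Or.inr h

theorem pvGuard_idc {instr : Bool} {c : Char}
    (h : (!instr && (c.isAlpha || c.isDigit || c == '_')) = true) : pvIdc c = true := by
  simp only [Bool.and_eq_true, Bool.or_eq_true] at h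
  simp only [pvIdc, Char.isAlphanum, Bool.or_eq_true]
  tauto

-- ===== PORT A =====
-- A's chained-field lookahead loop ("while i < len(expression) and expression[i] == '.'"):
-- returns the extra fields collected and the remaining input.
def chainA : List Char → List (List Char) × List Char
  | '.' :: c :: rest =>
    if h : pvFstart c = true then
      let fld := (c :: rest).takeWhile pvIdc
      let r := (c :: rest).dropWhile pvIdc
      let res := chainA r
      (fld :: res.1, res.2)
    else ([], '.' :: c :: rest)
  | l => ([], l)
  termination_by l => l.length
  decreasing_by
    simp only [List.dropWhile]
    rw [pvFstart_idc h]
    have := List.length_dropWhile_le pvIdc rest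
    simp only [List.length_cons]; omega

theorem chainA_snd_le (l : List Char) : (chainA l).2.length ≤ l.length := by
  induction l using chainA.induct with
  | case1 c rest h r ih =>
    have hr2 : r = List.dropWhile pvIdc (c :: rest) := rfl
    rw [hr2] at ih
    simp only [chainA, h, dite_true]
    have hr : (List.dropWhile pvIdc (c :: rest)).length ≤ rest.length := by
      simp only [List.dropWhile]
      rw [pvFstart_idc h]
      exact List.length_dropWhile_le pvIdc rest
    simp only [List.length_cons] at *
    omega
  | case2 c rest h => simp [chainA, h]
  | case3 l h =>
    match l, h with
    | [], _ => simp [chainA]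
    | [c], _ => simp [chainA]
    | c :: d :: r, h =>
      rw [chainA]
      exact h

-- A's main while-loop: the index i becomes the remaining character list, with the
-- in_string / string_char state carried along; the inner identifier scans are the
-- obvious takeWhile/dropWhile.
def loopA : List Char → Bool → Option Char → List Char
  | [], _, _ => []
  | c :: rest, instr, sc =>
    if c == '"' || c == '\'' then
      if !instr then c :: loopA rest true (some c)
      else if some c == sc then c :: loopA rest false none
      else c :: loopA rest instr sc
    else if hg : (!instr && (c.isAlpha || c.isDigit || c == '_')) = true then
      let ident := (c :: rest).takeWhile pvIdc
      let res := chainA ((c :: rest).dropWhile pvIdc)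
      (if res.1 ≠ [] then ident ++ (res.1.map pvBracket).flatten else ident)
        ++ loopA res.2 instr sc
    else c :: loopA rest instr sc
  termination_by l _ _ => l.length
  decreasing_by
    · simp
    · simp
    · simp
    · have h1 := chainA_snd_le ((c :: rest).dropWhile pvIdc)
      have h3 : ((c :: rest).dropWhile pvIdc).length < (c :: rest).length := by
        simp only [List.dropWhile]
        rw [pvGuard_idc hg]
        have := List.length_dropWhile_le pvIdc rest
        simp only [List.length_cons]; omega
      omega
    · simp

def transform_expression_py (expression : String) : String :=
  String.ofList (loopA expression.toList false none)

-- ===== PORT B =====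
-- Source B's _transform_code: local dot rule; the boolean carries Python's
-- "k > 0 and seg[k-1] is an identifier char" test.
def codeB : Bool → List Char → List Char
  | _, [] => []
  | p, c :: rest =>
    if c == '.' && p && pvFstartHead rest then
      pvBracket (rest.takeWhile pvIdc) ++ codeB true (rest.dropWhile pvIdc)
    else
      c :: codeB (pvIdc c) rest
  termination_by _ l => l.length
  decreasing_by
    · rename_i hc
      simp only [Bool.and_eq_true] at hc
      obtain ⟨-, hd⟩ := hc
      cases rest with
      | nil => simp [pvFstartHead] at hd
      | cons d r =>
        simp only [pvFstartHead] at hd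
        simp only [List.dropWhile]
        rw [pvFstart_idc hd]
        have := List.length_dropWhile_le pvIdc r
        simp only [List.length_cons]; omega
    · simp

-- Source B's _transform_expression: split at string literals (find the matching quote,
-- copy the literal verbatim), transform the code segments in between.
def segB : List Char → List Char
  | [] => []
  | c :: rest =>
    if c == '"' || c == '\'' then
      match hdw : rest.dropWhile (fun x => x != c) with
      | [] => c :: rest.takeWhile (fun x => x != c)
      | c' :: r2 => c :: (rest.takeWhile (fun x => x != c) ++ c' :: segB r2)
    else
      codeB false ((c :: rest).takeWhile (fun x => !(x == '"' || x == '\'')))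
        ++ segB ((c :: rest).dropWhile (fun x => !(x == '"' || x == '\'')))
  termination_by l => l.length
  decreasing_by
    · have := List.length_dropWhile_le (fun x => x != c) rest
      rw [hdw] at this
      simp only [List.length_cons] at *
      omega
    · rename_i hc
      simp only [List.dropWhile]
      have hcq : (!(c == '"' || c == '\'')) = true := by simp_all
      rw [hcq]
      have := List.length_dropWhile_le (fun x => !(x == '"' || x == '\'')) rest
      simp only [List.length_cons]; omega

def transform_expression_py_alt (expression : String) : String :=
  String.ofList (segB expression.toList)

-- ===== PRECONDITION & SPEC =====
def Spec_transform_expression_py (expression : String) (out : String) : Prop := out = transform_expression_py_alt expression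
instance (expression : String) (out : String) : Decidable (Spec_transform_expression_py expression out) := by unfold Spec_transform_expression_py; infer_instance

-- ===== CLAIM (what is proved, stated in full; the proofs are below) =====
def Claim_equal_transform_expression_py : Prop := ∀ (expression : String), Dom_transform_expression_py expression → Spec_transform_expression_py expression (transform_expression_py expression)

-- ===== LEMMAS AND PROOFS =====

-- Reference machine both ports are reduced to: one pass, string literals copied by
-- splitting, dots handled by the local prev-idc rule.
def pvM : Bool → List Char → List Char
  | _, [] => []
  | p, c :: rest =>
    if c == '"' || c == '\'' then
      match hdw : rest.dropWhile (fun x => x != c) with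
      | [] => c :: rest.takeWhile (fun x => x != c)
      | c' :: r2 => c :: (rest.takeWhile (fun x => x != c) ++ c' :: pvM false r2)
    else if c == '.' && p && pvFstartHead rest then
      pvBracket (rest.takeWhile pvIdc) ++ pvM true (rest.dropWhile pvIdc)
    else
      c :: pvM (pvIdc c) rest
  termination_by _ l => l.length
  decreasing_by
    · have := List.length_dropWhile_le (fun x => x != c) rest
      rw [hdw] at this
      simp only [List.length_cons] at *
      omega
    · rename_i hc
      simp only [Bool.and_eq_true] at hc
      obtain ⟨-, hd⟩ := hc
      cases rest with
      | nil => simp [pvFstartHead] at hd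
      | cons d r =>
        simp only [pvFstartHead] at hd
        simp only [List.dropWhile]
        rw [pvFstart_idc hd]
        have := List.length_dropWhile_le pvIdc r
        simp only [List.length_cons]; omega
    · simp

-- dot followed by a field-start character (the only case where the prev-idc flag matters)
def pvDotF (l : List Char) : Bool := match l with | '.' :: rest => pvFstartHead rest | _ => false

-- plain-match unfoldings of the quote branches
theorem pvM_quote (p : Bool) (c : Char) (rest : List Char)
    (hq : (c == '"' || c == '\'') = true) :
    pvM p (c :: rest) =
      (match rest.dropWhile (fun x => x != c) with
       | [] => c :: rest.takeWhile (fun x => x != c)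
       | c' :: r2 => c :: (rest.takeWhile (fun x => x != c) ++ c' :: pvM false r2)) := by
  rw [pvM]
  simp only [hq, if_true]
  split
  · rename_i heq
    rw [heq]
  · rename_i c' r2 heq
    rw [heq]

theorem segB_quote (c : Char) (rest : List Char)
    (hq : (c == '"' || c == '\'') = true) :
    segB (c :: rest) =
      (match rest.dropWhile (fun x => x != c) with
       | [] => c :: rest.takeWhile (fun x => x != c)
       | c' :: r2 => c :: (rest.takeWhile (fun x => x != c) ++ c' :: segB r2)) := by
  rw [segB]
  simp only [hq, if_true]
  split
  · rename_i heq
    rw [heq]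
  · rename_i c' r2 heq
    rw [heq]

theorem pvIdc_not_quote {c : Char} (h : pvIdc c = true) : (c == '"' || c == '\'') = false := by
  by_contra hq
  simp only [Bool.or_eq_true, Bool.not_eq_false] at hq
  rcases hq with hq | hq <;>
    (simp only [beq_iff_eq] at hq; subst hq; simp [pvIdc, Char.isAlphanum] at h) <;> simp_all

theorem pvIdc_not_dot {c : Char} (h : pvIdc c = true) : (c == '.') = false := by
  by_contra hq
  simp only [Bool.not_eq_false, beq_iff_eq] at hq
  subst hq
  simp [pvIdc, Char.isAlphanum] at h

theorem pvQuote_not_fstart {c : Char} (h : (c == '"' || c == '\'') = true) : pvFstart c = false := by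
  rcases Bool.or_eq_true_iff.mp h with hq | hq <;>
    (simp only [beq_iff_eq] at hq; subst hq; decide)

theorem pvQuote_not_idc {c : Char} (h : (c == '"' || c == '\'') = true) : pvIdc c = false := by
  rcases Bool.or_eq_true_iff.mp h with hq | hq <;>
    (simp only [beq_iff_eq] at hq; subst hq; decide)

-- takeWhile/dropWhile across an append whose right part starts by failing the predicate
theorem pv_tw_append {p : Char → Bool} (u v : List Char)
    (hv : v = [] ∨ ∃ d r, v = d :: r ∧ p d = false) :
    (u ++ v).takeWhile p = u.takeWhile p ∧ (u ++ v).dropWhile p = u.dropWhile p ++ v := by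
  induction u with
  | nil =>
    rcases hv with rfl | ⟨d, r, rfl, hd⟩
    · simp
    · simp [List.takeWhile, List.dropWhile, hd]
  | cons a u' ih =>
    by_cases ha : p a = true
    · simp only [List.cons_append, List.takeWhile, List.dropWhile, ha]
      exact ⟨by rw [ih.1], by rw [ih.2]⟩
    · simp only [List.cons_append, List.takeWhile, List.dropWhile,
        Bool.not_eq_true] at ha ⊢
      rw [ha]
      simp

theorem pv_all_dropWhile {p q : Char → Bool} (l : List Char) (h : l.all q = true) :
    (l.dropWhile p).all q = true := by
  induction l with
  | nil => simp
  | cons a l' ih =>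
    simp only [List.all_cons, Bool.and_eq_true] at h
    by_cases ha : p a = true
    · simp only [List.dropWhile, ha]
      exact ih h.2
    · simp only [List.dropWhile, Bool.not_eq_true] at ha ⊢
      rw [ha]
      simp [List.all_cons, h.1, h.2]

theorem pv_dw_head {p : Char → Bool} (l : List Char) {d : Char} {r : List Char}
    (h : l.dropWhile p = d :: r) : p d = false := by
  induction l with
  | nil => simp at h
  | cons a l' ih =>
    by_cases ha : p a = true
    · simp only [List.dropWhile, ha] at h
      exact ih h
    · simp only [List.dropWhile, Bool.not_eq_true] at ha h
      rw [ha] at h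
      injection h with h1 _
      subst h1
      exact ha

-- A in string mode copies characters up to (and including) the matching quote.
theorem pv_loopA_string (l : List Char) (q : Char) (hq : (q == '"' || q == '\'') = true) :
    loopA l true (some q) =
      (match l.dropWhile (fun x => x != q) with
       | [] => l.takeWhile (fun x => x != q)
       | c' :: r2 => l.takeWhile (fun x => x != q) ++ c' :: loopA r2 false none) := by
  induction l with
  | nil => simp [loopA]
  | cons c rest ih =>
    by_cases hcq : c = q
    · subst hcq
      rw [loopA]
      simp [hq, List.takeWhile, List.dropWhile]
    · have hne : (c != q) = true := by simp [hcq]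
      have hstep : loopA (c :: rest) true (some q) = c :: loopA rest true (some q) := by
        rw [loopA]
        by_cases hcquote : (c == '"' || c == '\'') = true
        · have : (some c == some q) = false := by simp [hcq]
          simp [hcquote, this]
        · have hng : (!true && (c.isAlpha || c.isDigit || c == '_')) = false := by simp
          simp [hcquote, hng]
      rw [hstep, ih]
      simp only [List.takeWhile, List.dropWhile, hne]
      cases rest.dropWhile (fun x => x != q) <;> simp

-- pvM walks an identifier-character run one character at a time, ending prev-idc true.
theorem pv_run (u : List Char) (l : List Char) (p : Bool)
    (hu : u.all pvIdc = true) (hne : u ≠ []) :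
    pvM p (u ++ l) = u ++ pvM true l := by
  induction u generalizing p with
  | nil => exact absurd rfl hne
  | cons a u' ih =>
    simp only [List.all_cons, Bool.and_eq_true] at hu
    have hq := pvIdc_not_quote hu.1
    have hd := pvIdc_not_dot hu.1
    rw [List.cons_append, pvM]
    simp only [hq, Bool.false_eq_true, if_false, hd, Bool.false_and, Bool.and_eq_true,
      Bool.false_eq_true, false_and, if_false, hu.1]
    by_cases hu' : u' = []
    · subst hu'; simp
    · rw [ih true hu.2 hu', List.cons_append]

-- On the chain region, pvM true produces exactly A's bracketed fields, and the
-- remainder never starts with a transformable dot.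
theorem pv_chain (l : List Char) :
    pvM true l = ((chainA l).1.map pvBracket).flatten ++ pvM true (chainA l).2 ∧
      pvDotF (chainA l).2 = false := by
  induction l using chainA.induct with
  | case1 c rest h r ih =>
    have hr2 : r = List.dropWhile pvIdc (c :: rest) := rfl
    rw [hr2] at ih
    constructor
    · rw [pvM]
      simp only [show (('.' : Char) == '"' || ('.' : Char) == '\'') = false from by decide,
        Bool.false_eq_true, if_false]
      have hg : (('.' : Char) == '.' && true && pvFstartHead (c :: rest)) = true := by
        simp [pvFstartHead, h]
      rw [if_pos hg]
      simp only [chainA, h, dite_true, List.map_cons, List.flatten_cons, List.append_assoc]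
      rw [ih.1]
    · simp only [chainA, h, dite_true]
      exact ih.2
  | case2 c rest h =>
    constructor
    · rw [chainA]
      simp [h]
    · rw [chainA]
      simp only [h, dite_false]
      simp only [pvDotF, pvFstartHead]
      simpa using h
  | case3 l hl =>
    have hc : chainA l = ([], l) := by
      match l, hl with
      | [], _ => simp [chainA]
      | [c], _ => simp [chainA]
      | c :: d :: r, hl =>
        rw [chainA]
        exact hl
    refine ⟨by rw [hc]; simp, ?_⟩
    rw [hc]
    match l, hl with
    | [], _ => rfl
    | [c], _ =>
      by_cases hcd : c = '.'
      · subst hcd; rfl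
      · simp only [pvDotF]
        split
        · rename_i heq
          exact absurd (List.head_eq_of_cons_eq heq) hcd
        · rfl
    | c :: d :: r, hl =>
      by_cases hcd : c = '.'
      · subst hcd
        exact (hl d r rfl).elim
      · simp only [pvDotF]
        split
        · rename_i heq
          exact absurd (List.head_eq_of_cons_eq heq) hcd
        · rfl

-- A's main loop equals the reference machine (prev-idc flag p; p may only be true
-- when the input does not start with a transformable dot).
theorem pv_AM : ∀ (n : Nat) (l : List Char) (p : Bool), l.length ≤ n →
    (p = true → pvDotF l = false) → loopA l false none = pvM p l := by
  intro n
  induction n with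
  | zero =>
    intro l p hl _
    have : l = [] := by cases l <;> simp_all
    subst this
    simp [loopA, pvM]
  | succ n ih =>
    intro l p hl hsafe
    cases l with
    | nil => simp [loopA, pvM]
    | cons c rest =>
      by_cases hq : (c == '"' || c == '\'') = true
      · -- opening quote
        rw [loopA]
        simp only [hq, if_true, Bool.not_false, if_true]
        rw [pv_loopA_string rest c hq, pvM_quote p c rest hq]
        cases hdw : rest.dropWhile (fun x => x != c) with
        | nil => rfl
        | cons c' r2 =>
          have hlen : r2.length ≤ n := by
            have h1 := List.length_dropWhile_le (fun x => x != c) rest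
            rw [hdw] at h1
            simp only [List.length_cons] at *
            omega
          simp only [ih r2 false hlen (by simp)]
      · by_cases hid : pvIdc c = true
        · -- identifier run + chain
          have hg : (!false && (c.isAlpha || c.isDigit || c == '_')) = true := by
            simp only [Bool.not_false, Bool.true_and]
            simpa [pvIdc, Char.isAlphanum, Bool.or_assoc] using hid
          rw [loopA]
          simp only [hq, Bool.false_eq_true, if_false, hg, dite_true]
          have htw : (c :: rest).takeWhile pvIdc ≠ [] := by
            simp [List.takeWhile, hid]
          have hall : ((c :: rest).takeWhile pvIdc).all pvIdc = true :=
            List.all_takeWhile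
          have hsplit : (c :: rest).takeWhile pvIdc ++ (c :: rest).dropWhile pvIdc
              = c :: rest := List.takeWhile_append_dropWhile
          have hM : pvM p (c :: rest)
              = (c :: rest).takeWhile pvIdc ++ pvM true ((c :: rest).dropWhile pvIdc) := by
            conv_lhs => rw [← hsplit]
            exact pv_run _ _ p hall htw
          have hch := pv_chain ((c :: rest).dropWhile pvIdc)
          have hlen : (chainA ((c :: rest).dropWhile pvIdc)).2.length ≤ n := by
            have h1 := chainA_snd_le ((c :: rest).dropWhile pvIdc)
            have h2 : ((c :: rest).dropWhile pvIdc).length < (c :: rest).length := by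
              simp only [List.dropWhile, hid]
              have := List.length_dropWhile_le pvIdc rest
              simp only [List.length_cons]; omega
            simp only [List.length_cons] at *
            omega
          rw [hM, hch.1, ih _ true hlen (fun _ => hch.2)]
          cases hres : (chainA ((c :: rest).dropWhile pvIdc)).1 with
          | nil => simp
          | cons f fs => simp
        · -- ordinary character
          rw [loopA, pvM]
          simp only [hq, Bool.false_eq_true, if_false]
          have hg : (!false && (c.isAlpha || c.isDigit || c == '_')) = false := by
            simp only [Bool.not_false, Bool.true_and]
            simpa [pvIdc, Char.isAlphanum, Bool.or_assoc] using hid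
          rw [dif_neg (by rw [hg]; simp)]
          have hdot : (c == '.' && p && pvFstartHead rest) = false := by
            by_cases hp : p = true
            · have := hsafe hp
              simp only [pvDotF] at this
              by_cases hcd : c = '.'
              · subst hcd
                simp only at this
                simp [this]
              · simp [hcd]
            · simp only [Bool.not_eq_true] at hp
              simp [hp]
          rw [if_neg (by simp [hdot])]
          have hlen : rest.length ≤ n := by
            simp only [List.length_cons] at hl; omega
          rw [ih rest (pvIdc c) hlen ?_]
          · intro hc; simp_all

-- pvM ignores the flag when the input is empty or starts with a quote.
theorem pv_pirr (l : List Char) (p : Bool)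
    (h : l = [] ∨ ∃ d r, l = d :: r ∧ (d == '"' || d == '\'') = true) :
    pvM p l = pvM false l := by
  rcases h with rfl | ⟨d, r, rfl, hd⟩
  · simp [pvM]
  · rw [pvM, pvM]
    simp [hd]

-- On a quote-free code segment followed by nothing or a string literal, pvM is codeB.
theorem pv_codeseg : ∀ (n : Nat) (code : List Char) (p : Bool) (rest : List Char),
    code.length ≤ n → code.all (fun x => !(x == '"' || x == '\'')) = true →
    (rest = [] ∨ ∃ d r, rest = d :: r ∧ (d == '"' || d == '\'') = true) →
    pvM p (code ++ rest) = codeB p code ++ pvM false rest := by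
  intro n
  induction n with
  | zero =>
    intro code p rest hl _ hrest
    have : code = [] := by cases code <;> simp_all
    subst this
    have h0 : codeB p [] = ([] : List Char) := by rw [codeB]
    simp only [List.nil_append, h0]
    exact pv_pirr rest p hrest
  | succ n ih =>
    intro code p rest hl hall hrest
    cases code with
    | nil =>
      have h0 : codeB p [] = ([] : List Char) := by rw [codeB]
      simp only [List.nil_append, h0]
      exact pv_pirr rest p hrest
    | cons c ct =>
      simp only [List.all_cons, Bool.and_eq_true] at hall
      have hq : (c == '"' || c == '\'') = false := by
        have := hall.1; simp_all
      have hhead : pvFstartHead (ct ++ rest) = pvFstartHead ct := by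
        cases ct with
        | cons d r => rfl
        | nil =>
          rcases hrest with rfl | ⟨d, r, rfl, hd⟩
          · rfl
          · simp [pvFstartHead, pvQuote_not_fstart hd]
      have hbound : rest = [] ∨ ∃ d r, rest = d :: r ∧ pvIdc d = false := by
        rcases hrest with rfl | ⟨d, r, rfl, hd⟩
        · exact Or.inl rfl
        · exact Or.inr ⟨d, r, rfl, pvQuote_not_idc hd⟩
      rw [List.cons_append, pvM, codeB]
      simp only [hq, Bool.false_eq_true, if_false, hhead]
      by_cases hg : (c == '.' && p && pvFstartHead ct) = true
      · rw [if_pos hg, if_pos hg]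
        have htw := pv_tw_append (p := pvIdc) ct rest hbound
        rw [htw.1, htw.2]
        have hlen : (ct.dropWhile pvIdc).length ≤ n := by
          have := List.length_dropWhile_le pvIdc ct
          simp only [List.length_cons] at hl
          omega
        rw [ih (ct.dropWhile pvIdc) true rest hlen (pv_all_dropWhile ct hall.2) hrest]
        simp
      · rw [if_neg hg, if_neg hg]
        have hlen : ct.length ≤ n := by simp only [List.length_cons] at hl; omega
        rw [ih ct (pvIdc c) rest hlen hall.2 hrest]
        simp

-- B equals the reference machine.
theorem pv_BM : ∀ (n : Nat) (l : List Char), l.length ≤ n → segB l = pvM false l := by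
  intro n
  induction n with
  | zero =>
    intro l hl
    have : l = [] := by cases l <;> simp_all
    subst this
    simp [segB, pvM]
  | succ n ih =>
    intro l hl
    cases l with
    | nil => simp [segB, pvM]
    | cons c rest =>
      by_cases hq : (c == '"' || c == '\'') = true
      · rw [segB_quote c rest hq, pvM_quote false c rest hq]
        cases hdw : rest.dropWhile (fun x => x != c) with
        | nil => rfl
        | cons c' r2 =>
          have hlen : r2.length ≤ n := by
            have h1 := List.length_dropWhile_le (fun x => x != c) rest
            rw [hdw] at h1
            simp only [List.length_cons] at *
            omega
          simp only [ih r2 hlen]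
      · rw [segB]
        simp only [hq, Bool.false_eq_true, if_false]
        have hnq : (!(c == '"' || c == '\'')) = true := by simp_all
        have hsplit : (c :: rest).takeWhile (fun x => !(x == '"' || x == '\'')) ++
            (c :: rest).dropWhile (fun x => !(x == '"' || x == '\'')) = c :: rest :=
          List.takeWhile_append_dropWhile
        have hall : ((c :: rest).takeWhile (fun x => !(x == '"' || x == '\''))).all
            (fun x => !(x == '"' || x == '\'')) = true :=
          List.all_takeWhile
        have hrest : (c :: rest).dropWhile (fun x => !(x == '"' || x == '\'')) = [] ∨
            ∃ d r, (c :: rest).dropWhile (fun x => !(x == '"' || x == '\'')) = d :: r ∧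
              (d == '"' || d == '\'') = true := by
          cases hdw : (c :: rest).dropWhile (fun x => !(x == '"' || x == '\'')) with
          | nil => exact Or.inl rfl
          | cons d r =>
            refine Or.inr ⟨d, r, rfl, ?_⟩
            have hf := pv_dw_head _ hdw
            simp only [Bool.not_eq_false'] at hf
            simpa using hf
        have hM : pvM false (c :: rest)
            = codeB false ((c :: rest).takeWhile (fun x => !(x == '"' || x == '\''))) ++
              pvM false ((c :: rest).dropWhile (fun x => !(x == '"' || x == '\''))) := by
          conv_lhs => rw [← hsplit]
          exact pv_codeseg _ _ false _ le_rfl hall hrest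
        rw [hM]
        have hlen : ((c :: rest).dropWhile (fun x => !(x == '"' || x == '\''))).length ≤ n := by
          simp only [List.dropWhile, hnq]
          have := List.length_dropWhile_le (fun x => !(x == '"' || x == '\'')) rest
          simp only [List.length_cons] at hl
          omega
        rw [ih _ hlen]

-- ===== VERDICT (by name: the statement is the Claim_ definition above) =====
theorem transform_expression_py_spec : Claim_equal_transform_expression_py := by
  intro expression _
  unfold Spec_transform_expression_py transform_expression_py transform_expression_py_alt
  rw [pv_AM expression.toList.length expression.toList false le_rfl (by simp),
    pv_BM expression.toList.length expression.toList le_rfl]
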